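-- pv_equiv track=rewrite | github.com/colehoener/DataStructuresAndAlgorithms | Hash/open_hash.py | hash3
-- ===== SOURCE A (Python) =====
-- def hash3(num,size):
-- 	word=str(num)
-- 	total=0
-- 	for x in range(0,len(word)):
-- 		c=word[x]
-- 		total=total+ord(c)
-- 		total=total*1010
-- 	return total % size
-- ===== SOURCE B (Python) =====
-- def hash3(num, size):
--     word = str(num)
--     n = len(word)
--     return sum(ord(c) * 1010 ** (n - i) for i, c in enumerate(word)) % size
-- ===== Notes on version B (the rewrite author's own statement) =====
-- stated objective: alternative
-- what changed: Replaces the Horner-style running multiply-accumulate loop with a direct closed-form polynomial sum of ord(c)*1010**(n-i) over enumerate(word).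
import Mathlib
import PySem

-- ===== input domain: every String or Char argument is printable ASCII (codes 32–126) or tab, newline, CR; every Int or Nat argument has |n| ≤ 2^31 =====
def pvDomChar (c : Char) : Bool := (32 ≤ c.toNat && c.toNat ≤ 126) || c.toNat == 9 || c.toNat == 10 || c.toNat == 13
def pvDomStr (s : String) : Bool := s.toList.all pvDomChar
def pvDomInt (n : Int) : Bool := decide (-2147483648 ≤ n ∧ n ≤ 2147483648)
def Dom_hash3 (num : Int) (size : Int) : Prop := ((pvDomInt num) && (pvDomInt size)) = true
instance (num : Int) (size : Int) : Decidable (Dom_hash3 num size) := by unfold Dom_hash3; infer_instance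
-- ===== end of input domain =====

-- B replaces A's Horner-style running multiply-accumulate loop with a direct
-- closed-form polynomial sum ord(c)*1010^(n-i); objective: alternative decomposition.

-- ===== PORT A =====
-- for x in range(0, len(word)): c = word[x]; total = total + ord(c); total = total * 1010
def hash3 (num : Int) (size : Int) : Int :=
  let word := PySem.Int.toChars num
  let total := (PySem.List.pyRange 0 word.length 1).foldl
    (fun t x => (t + ((PySem.List.pyGetD word x ' ').toNat : Int)) * 1010) 0
  PySem.Int.mod total size

-- ===== PORT B =====
-- sum(ord(c) * 1010 ** (n - i) for i, c in enumerate(word)) % size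
def hash3_alt (num : Int) (size : Int) : Int :=
  let word := PySem.Int.toChars num
  let n := word.length
  let total := ((PySem.List.enumerate word).map
    (fun p => ((p.2.toNat : Int)) * 1010 ^ (n - p.1.toNat))).sum
  PySem.Int.mod total size

-- ===== PRECONDITION & SPEC =====
-- Pre_ excludes size = 0, on which A (and B) raise ZeroDivisionError.
def Pre_hash3 (num : Int) (size : Int) : Prop := size ≠ 0
instance (num : Int) (size : Int) : Decidable (Pre_hash3 num size) := by unfold Pre_hash3; infer_instance
def pvWitness_hash3 : Int × Int := (123, 7)

def Spec_hash3 (num : Int) (size : Int) (out : Int) : Prop := out = hash3_alt num size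
instance (num : Int) (size : Int) (out : Int) : Decidable (Spec_hash3 num size out) := by unfold Spec_hash3; infer_instance

-- ===== CLAIM (what is proved, stated in full; the proofs are below) =====
def Claim_equal_hash3 : Prop := ∀ (num : Int) (size : Int), Dom_hash3 num size → Pre_hash3 num size → Spec_hash3 num size (hash3 num size)

-- ===== LEMMAS AND PROOFS =====

-- the common polynomial: poly (c::cs) = ord c * 1010^(|cs|+1) + poly cs
def hornerPoly : List Char → Int
  | [] => 0
  | c :: cs => (c.toNat : Int) * 1010 ^ (cs.length + 1) + hornerPoly cs

theorem horner_eq_poly (l : List Char) (t0 : Int) :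
    l.foldl (fun t c => (t + (c.toNat : Int)) * 1010) t0
      = t0 * 1010 ^ l.length + hornerPoly l := by
  induction l generalizing t0 with
  | nil => simp [hornerPoly]
  | cons c cs ih =>
    simp only [List.foldl_cons, hornerPoly, List.length_cons, ih]
    ring

theorem poly_eq_sum (l : List Char) (s : Nat) :
    ((PySem.List.enumerate l (s : Int)).map
        (fun p => ((p.2.toNat : Int)) * 1010 ^ (s + l.length - p.1.toNat))).sum
      = hornerPoly l := by
  induction l generalizing s with
  | nil => simp [hornerPoly]
  | cons c cs ih =>
    have hcast : ((s : Int) + 1) = ((s + 1 : Nat) : Int) := by push_cast; ring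
    have hexp : s + (c :: cs).length = (s + 1) + cs.length := by
      simp [List.length_cons]; omega
    simp only [PySem.List.enumerate_cons, List.map_cons, List.sum_cons, hcast, hexp, ih]
    simp [hornerPoly]
    omega

theorem hash3_spec : Claim_equal_hash3 := by
  intro num size _ _
  unfold Spec_hash3 hash3 hash3_alt
  dsimp only
  congr 1
  rw [PySem.List.foldl_pyRange_zero_pyGetD' (PySem.Int.toChars num) ' ' (fun t c => (t + (c.toNat : Int)) * 1010) 0]
  have := poly_eq_sum (PySem.Int.toChars num) 0
  simp only [Nat.cast_zero, Nat.zero_add] at this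
  rw [horner_eq_poly, ← this]
  simp
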